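-- pv_equiv track=rewrite | github.com/ucsdsysnet/trufflehunter | trufflehunter/core/dns_lib.py | splitResponses
-- ===== SOURCE A (Python) =====
-- def splitResponses(resp):
--     responses = []
--     single_response = ''
--     lines = resp.split('\n')
--     for i, line in enumerate(lines):
--         if ('->>HEADER<<-' in line  and i > 7):
--             responses.append(single_response)
--             single_response = ''
--             single_response += line + '\n'
--
--         else:
--             single_response += line + '\n'
--     # Append the last response too
--     responses.append(single_response)
--     return responses
-- ===== SOURCE B (Python) =====
-- def splitResponses(resp):
--     lines = resp.split('\n')
--     bs = [i for i, line in enumerate(lines) if '->>HEADER<<-' in line and i > 7]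
--     cuts = [0] + bs + [len(lines)]
--     return [''.join(line + '\n' for line in lines[a:b]) for a, b in zip(cuts, cuts[1:])]
-- ===== Notes on version B (the rewrite author's own statement) =====
-- stated objective: alternative
-- what changed: Replaces A's single stateful accumulator loop (building the current segment string line by line and flushing it at each header) with a two-pass decomposition: first collect the boundary indices of header lines, then slice the line list at consecutive boundaries and join each group.
import Mathlib
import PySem

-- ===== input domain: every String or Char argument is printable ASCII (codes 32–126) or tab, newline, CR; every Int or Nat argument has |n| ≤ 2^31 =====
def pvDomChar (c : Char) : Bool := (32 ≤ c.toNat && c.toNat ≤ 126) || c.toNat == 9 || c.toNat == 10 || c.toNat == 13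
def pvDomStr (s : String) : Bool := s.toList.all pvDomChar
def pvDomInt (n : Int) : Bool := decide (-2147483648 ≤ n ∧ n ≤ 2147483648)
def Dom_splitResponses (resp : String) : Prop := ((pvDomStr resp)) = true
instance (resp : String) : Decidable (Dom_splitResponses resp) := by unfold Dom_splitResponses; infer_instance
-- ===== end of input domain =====

-- B replaces A's stateful accumulator loop by boundary-index collection plus slicing; same O(n) cost (objective: alternative).

-- ===== PORT A =====
def splitResponses (resp : String) : List String :=
  let lines := PySem.Chars.splitOn resp.toList "\n".toList
  let st := (PySem.List.enumerate lines 0).foldl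
    (fun (acc : List (List Char) × List Char) p =>
      if PySem.Chars.isIn "->>HEADER<<-".toList p.2 && decide ((7 : Int) < p.1) then
        (acc.1 ++ [acc.2], p.2 ++ ['\n'])
      else
        (acc.1, acc.2 ++ p.2 ++ ['\n']))
    ([], [])
  (st.1 ++ [st.2]).map String.mk

-- ===== PORT B =====
def splitResponses_alt (resp : String) : List String :=
  let lines := PySem.Chars.splitOn resp.toList "\n".toList
  let bs := (PySem.List.enumerate lines 0).filterMap
    (fun p =>
      if PySem.Chars.isIn "->>HEADER<<-".toList p.2 && decide ((7 : Int) < p.1) then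
        some p.1
      else none)
  let cuts : List Int := 0 :: bs ++ [(lines.length : Int)]
  ((cuts.zip cuts.tail).map (fun ab =>
    PySem.Chars.join []
      ((PySem.List.slice lines (some ab.1) (some ab.2)).map (fun line => line ++ ['\n'])))).map String.mk

-- ===== PRECONDITION & SPEC =====
def Spec_splitResponses (resp : String) (out : List String) : Prop := out = splitResponses_alt resp
instance (resp : String) (out : List String) : Decidable (Spec_splitResponses resp out) := by unfold Spec_splitResponses; infer_instance

-- ===== CLAIM (what is proved, stated in full; the proofs are below) =====
def Claim_equal_splitResponses : Prop := ∀ (resp : String), Dom_splitResponses resp → Spec_splitResponses resp (splitResponses resp)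

-- ===== LEMMAS AND PROOFS =====

-- the loop condition shared by both ports
def pvCond (i : Int) (l : List Char) : Bool :=
  PySem.Chars.isIn "->>HEADER<<-".toList l && decide ((7 : Int) < i)

-- recursive specification of the segment list, starting at line index k with current segment cur
def pvS (k : Int) (cur : List Char) : List (List Char) → List (List Char)
  | [] => [cur]
  | l :: ls =>
    if pvCond k l then cur :: pvS (k + 1) (l ++ ['\n']) ls
    else pvS (k + 1) (cur ++ l ++ ['\n']) ls

-- boundary indices starting at index k
def pvBs (k : Int) : List (List Char) → List Int
  | [] => []
  | l :: ls => if pvCond k l then k :: pvBs (k + 1) ls else pvBs (k + 1) ls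

def pvModHead (cur : List Char) : List (List Char) → List (List Char)
  | [] => []
  | g :: gs => (cur ++ g) :: gs

def pvSeg (M : List (List Char)) (a b : Int) : List Char :=
  PySem.Chars.join [] ((PySem.List.slice M (some a) (some b)).map (fun line => line ++ ['\n']))

def pvPm (M : List (List Char)) (k : Int) (c : List Int) : List (List Char) :=
  (c.zip c.tail).map (fun ab => pvSeg M (ab.1 - k) (ab.2 - k))

theorem pvJoin_nil_cons (a : List Char) (l : List (List Char)) :
    PySem.Chars.join [] (a :: l) = a ++ PySem.Chars.join [] l := by
  cases l with
  | nil => rw [PySem.Chars.join_singleton, PySem.Chars.join_nil, List.append_nil]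
  | cons b bs => rw [PySem.Chars.join_cons_cons]; simp

theorem pvModHead_append (c d : List Char) (t : List (List Char)) :
    pvModHead c (pvModHead d t) = pvModHead (c ++ d) t := by
  cases t <;> simp [pvModHead]

theorem pvS_prefix (M : List (List Char)) : ∀ (k : Int) (cur : List Char),
    pvS k cur M = pvModHead cur (pvS k [] M) := by
  induction M with
  | nil => intro k cur; simp [pvS, pvModHead]
  | cons l ls ih =>
    intro k cur
    by_cases h : pvCond k l = true
    · simp [pvS, h, pvModHead]
    · simp only [pvS, h, Bool.false_eq_true, if_false, List.nil_append]
      rw [ih (k + 1) (cur ++ l ++ ['\n']), ih (k + 1) (l ++ ['\n']), pvModHead_append]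
      simp [List.append_assoc]

theorem pvBs_ge (M : List (List Char)) : ∀ (k b : Int), b ∈ pvBs k M → k ≤ b := by
  induction M with
  | nil => intro k b h; simp [pvBs] at h
  | cons l ls ih =>
    intro k b h
    by_cases hc : pvCond k l = true
    · simp [pvBs, hc] at h
      rcases h with h | h
      · omega
      · have := ih (k + 1) b h; omega
    · simp [pvBs, hc] at h
      have := ih (k + 1) b h; omega

theorem pvSeg_shift (l : List Char) (ls : List (List Char)) (k a b : Int)
    (ha : k + 1 ≤ a) (hb : k + 1 ≤ b) :
    pvSeg (l :: ls) (a - k) (b - k) = pvSeg ls (a - (k + 1)) (b - (k + 1)) := by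
  unfold pvSeg
  rw [PySem.List.slice_toNat (l :: ls) (a := a - k) (b := b - k) (by omega) (by omega),
      PySem.List.slice_toNat ls (a := a - (k + 1)) (b := b - (k + 1)) (by omega) (by omega)]
  have h1 : (a - k).toNat = (a - (k + 1)).toNat + 1 := by omega
  rw [h1, List.drop_succ_cons]
  have h2 : (b - k).toNat - ((a - (k + 1)).toNat + 1) = (b - (k + 1)).toNat - (a - (k + 1)).toNat := by
    omega
  rw [h2]

theorem pvPm_shift_tail (l : List Char) (ls : List (List Char)) :
    ∀ (c : List Int) (k : Int), (∀ x ∈ c, k + 1 ≤ x) →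
    pvPm (l :: ls) k c = pvPm ls (k + 1) c := by
  intro c
  induction c with
  | nil => intro k _; simp [pvPm]
  | cons a cs ih =>
    intro k hc
    cases cs with
    | nil => simp [pvPm]
    | cons b rs =>
      have ha : k + 1 ≤ a := hc a (by simp)
      have hb : k + 1 ≤ b := hc b (by simp)
      have htl : pvPm (l :: ls) k (b :: rs) = pvPm ls (k + 1) (b :: rs) :=
        ih k (fun x hx => hc x (by simp at hx ⊢; tauto))
      simp only [pvPm, List.tail_cons, List.zip_cons_cons, List.map_cons] at htl ⊢
      rw [pvSeg_shift l ls k a b ha hb]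
      exact congrArg _ htl

theorem pvSeg_zero_cons (l : List Char) (ls : List (List Char)) (k h : Int) (hh : k + 1 ≤ h) :
    pvSeg (l :: ls) (k - k) (h - k) = (l ++ ['\n']) ++ pvSeg ls ((k + 1) - (k + 1)) (h - (k + 1)) := by
  unfold pvSeg
  rw [PySem.List.slice_toNat (l :: ls) (a := k - k) (b := h - k) (by omega) (by omega),
      PySem.List.slice_toNat ls (a := (k + 1) - (k + 1)) (b := h - (k + 1)) (by omega) (by omega)]
  simp only [Int.sub_self, Int.toNat_zero, Nat.sub_zero, List.drop_zero]
  have h1 : (h - k).toNat = (h - (k + 1)).toNat + 1 := by omega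
  rw [h1, List.take_succ_cons, List.map_cons, pvJoin_nil_cons]

theorem pvPm_head (l : List Char) (ls : List (List Char)) (rest : List Int) (k : Int)
    (hr : ∀ x ∈ rest, k + 1 ≤ x) :
    pvPm (l :: ls) k (k :: rest) = pvModHead (l ++ ['\n']) (pvPm ls (k + 1) ((k + 1) :: rest)) := by
  cases rest with
  | nil => simp [pvPm, pvModHead]
  | cons h rs =>
    have hh : k + 1 ≤ h := hr h (by simp)
    have htl : pvPm (l :: ls) k (h :: rs) = pvPm ls (k + 1) (h :: rs) :=
      pvPm_shift_tail l ls (h :: rs) k hr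
    simp only [pvPm, List.tail_cons, List.zip_cons_cons, List.map_cons, pvModHead] at htl ⊢
    rw [pvSeg_zero_cons l ls k h hh]
    exact congrArg _ htl

theorem pvPm_main (M : List (List Char)) : ∀ (k : Int),
    pvPm M k (k :: (pvBs k M ++ [k + (M.length : Int)])) = pvS k [] M := by
  induction M with
  | nil =>
    intro k
    simp [pvBs, pvPm, pvS, pvSeg, PySem.List.slice, PySem.Chars.join_nil]
  | cons l ls ih =>
    intro k
    have hlen : k + ((l :: ls).length : Int) = (k + 1) + (ls.length : Int) := by
      simp; omega
    have hrest : ∀ x ∈ pvBs (k + 1) ls ++ [(k + 1) + (ls.length : Int)], k + 1 ≤ x := by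
      intro x hx
      simp at hx
      rcases hx with hx | hx
      · exact pvBs_ge ls (k + 1) x hx
      · omega
    rw [hlen]
    by_cases hc : pvCond k l = true
    · have hbs : pvBs k (l :: ls) = k :: pvBs (k + 1) ls := by simp [pvBs, hc]
      rw [hbs]
      simp only [List.cons_append]
      have hfirst :
          pvPm (l :: ls) k (k :: (k :: (pvBs (k + 1) ls ++ [(k + 1) + (ls.length : Int)]))) =
          pvSeg (l :: ls) (k - k) (k - k) ::
            pvPm (l :: ls) k (k :: (pvBs (k + 1) ls ++ [(k + 1) + (ls.length : Int)])) := by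
        simp [pvPm]
      rw [hfirst]
      have hseg0 : pvSeg (l :: ls) (k - k) (k - k) = [] := by
        unfold pvSeg
        rw [PySem.List.slice_toNat (l :: ls) (a := k - k) (b := k - k) (by omega) (by omega)]
        simp [PySem.Chars.join_nil]
      rw [hseg0, pvPm_head l ls _ k hrest, ih (k + 1)]
      have hS : pvS k [] (l :: ls) = [] :: pvS (k + 1) (l ++ ['\n']) ls := by
        simp [pvS, hc]
      rw [hS, pvS_prefix ls (k + 1) (l ++ ['\n'])]
    · have hbs : pvBs k (l :: ls) = pvBs (k + 1) ls := by simp [pvBs, hc]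
      rw [hbs, pvPm_head l ls _ k hrest, ih (k + 1)]
      have hS : pvS k [] (l :: ls) = pvS (k + 1) (l ++ ['\n']) ls := by
        simp [pvS, hc]
      rw [hS, pvS_prefix ls (k + 1) (l ++ ['\n'])]

theorem pvA_loop (M : List (List Char)) :
    ∀ (k : Int) (acc : List (List Char)) (cur : List Char),
    ((PySem.List.enumerate M k).foldl
      (fun (acc : List (List Char) × List Char) p =>
        if PySem.Chars.isIn "->>HEADER<<-".toList p.2 && decide ((7 : Int) < p.1) then
          (acc.1 ++ [acc.2], p.2 ++ ['\n'])
        else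
          (acc.1, acc.2 ++ p.2 ++ ['\n']))
      (acc, cur)).1 ++
    [((PySem.List.enumerate M k).foldl
      (fun (acc : List (List Char) × List Char) p =>
        if PySem.Chars.isIn "->>HEADER<<-".toList p.2 && decide ((7 : Int) < p.1) then
          (acc.1 ++ [acc.2], p.2 ++ ['\n'])
        else
          (acc.1, acc.2 ++ p.2 ++ ['\n']))
      (acc, cur)).2] = acc ++ pvS k cur M := by
  induction M with
  | nil => intro k acc cur; simp [PySem.List.enumerate_nil, pvS]
  | cons l ls ih =>
    intro k acc cur
    rw [PySem.List.enumerate_cons]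
    by_cases hc : pvCond k l = true
    · have hc' : (PySem.Chars.isIn "->>HEADER<<-".toList l && decide ((7 : Int) < k)) = true := hc
      simp only [List.foldl_cons, hc', if_true]
      rw [ih (k + 1) (acc ++ [cur]) (l ++ ['\n'])]
      simp [pvS, hc]
    · have hc' : (PySem.Chars.isIn "->>HEADER<<-".toList l && decide ((7 : Int) < k)) = false := by
        simpa [pvCond] using hc
      simp only [List.foldl_cons, hc', Bool.false_eq_true, if_false]
      rw [ih (k + 1) acc (cur ++ l ++ ['\n'])]
      simp [pvS, hc]

theorem pvB_bs (M : List (List Char)) : ∀ (k : Int),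
    (PySem.List.enumerate M k).filterMap
      (fun p =>
        if PySem.Chars.isIn "->>HEADER<<-".toList p.2 && decide ((7 : Int) < p.1) then
          some p.1
        else none) = pvBs k M := by
  induction M with
  | nil => intro k; simp [PySem.List.enumerate_nil, pvBs]
  | cons l ls ih =>
    intro k
    rw [PySem.List.enumerate_cons]
    by_cases hc : pvCond k l = true
    · have hc' : (PySem.Chars.isIn "->>HEADER<<-".toList l && decide ((7 : Int) < k)) = true := hc
      simp only [List.filterMap_cons, hc', if_true]
      rw [ih (k + 1)]
      simp [pvBs, hc]
    · have hc' : (PySem.Chars.isIn "->>HEADER<<-".toList l && decide ((7 : Int) < k)) = false := by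
        simpa [pvCond] using hc
      simp only [List.filterMap_cons, hc', Bool.false_eq_true, if_false]
      rw [ih (k + 1)]
      simp [pvBs, hc]

-- ===== VERDICT (by name: the statement is the Claim_ definition above) =====
theorem splitResponses_spec : Claim_equal_splitResponses := by
  intro resp _
  unfold Spec_splitResponses splitResponses splitResponses_alt
  dsimp only
  rw [pvA_loop (PySem.Chars.splitOn resp.toList "\n".toList) 0 [] [],
      pvB_bs (PySem.Chars.splitOn resp.toList "\n".toList) 0]
  simp only [List.cons_append, List.nil_append]
  have hpm :
      ((((0 : Int) :: (pvBs 0 (PySem.Chars.splitOn resp.toList "\n".toList) ++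
          [((PySem.Chars.splitOn resp.toList "\n".toList).length : Int)])).zip
        (((0 : Int) :: (pvBs 0 (PySem.Chars.splitOn resp.toList "\n".toList) ++
          [((PySem.Chars.splitOn resp.toList "\n".toList).length : Int)])).tail)).map (fun ab =>
      PySem.Chars.join []
        ((PySem.List.slice (PySem.Chars.splitOn resp.toList "\n".toList)
            (some ab.1) (some ab.2)).map (fun line => line ++ ['\n'])))) =
      pvPm (PySem.Chars.splitOn resp.toList "\n".toList) 0
        ((0 : Int) :: (pvBs 0 (PySem.Chars.splitOn resp.toList "\n".toList) ++
          [((PySem.Chars.splitOn resp.toList "\n".toList).length : Int)])) := by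
    simp [pvPm, pvSeg]
  rw [hpm]
  have hm := pvPm_main (PySem.Chars.splitOn resp.toList "\n".toList) 0
  rw [zero_add] at hm
  rw [hm]
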